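-- pv_equiv track=rewrite | github.com/Diamoutene1/python-oriente-objet | S01_TP01_template.py | get_molar_mass
-- ===== SOURCE A (Python) =====
-- def is_dna(dna):
--     """ Retourne 'True' si le brin 'dna' contient uniquement des bases A, T, G ou C (et au moins une).
--     'False' sinon. Il faudra utiliser la fonction 'are_chars'."""
--     if not dna:
--         return False
--     return all(char in "ATGC" for char in dna.upper())
--
-- def get_molar_mass(dna):
--     """ Retourne 0 si dna n'est pas un brin. Sinon, retourne la masse molaire du brin 'dna'.
--     Il faudra utiliser la fonction 'is_dna'."""
--     if is_dna(dna) ==True: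
--         compt=0
--         for base in dna:
--             if base=="A":
--                 compt+=135
--             elif base=="T":
--                  compt+=126
--             elif base=="G":
--                  compt+=151
--             elif base=="C":
--                  compt+=111  # Correction de l'opérateur +=
--         return compt
--     return 0
-- ===== SOURCE B (Python) =====
-- def is_dna(dna):
--     """ Retourne 'True' si le brin 'dna' contient uniquement des bases A, T, G ou C (et au moins une).
--     'False' sinon."""
--     if not dna:
--         return False
--     return all(char in "ATGC" for char in dna.upper())
--
-- MASSES = {'A': 135, 'T': 126, 'G': 151, 'C': 111}
--
-- def get_molar_mass(dna):
--     """ Retourne 0 si dna n'est pas un brin. Sinon, la masse molaire du brin 'dna'."""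
--     if is_dna(dna) == True:
--         counts = {}
--         for ch in dna:
--             counts[ch] = counts.get(ch, 0) + 1
--         return sum(m * counts.get(b, 0) for b, m in MASSES.items())
--     return 0
-- ===== Notes on version B (the rewrite author's own statement) =====
-- stated objective: alternative
-- what changed: Replaces the per-character if/elif accumulation loop with an aggregate-then-weight pass: build a frequency dict of the characters once, then compute the mass as a weighted sum over the four base->mass pairs.
import Mathlib
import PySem

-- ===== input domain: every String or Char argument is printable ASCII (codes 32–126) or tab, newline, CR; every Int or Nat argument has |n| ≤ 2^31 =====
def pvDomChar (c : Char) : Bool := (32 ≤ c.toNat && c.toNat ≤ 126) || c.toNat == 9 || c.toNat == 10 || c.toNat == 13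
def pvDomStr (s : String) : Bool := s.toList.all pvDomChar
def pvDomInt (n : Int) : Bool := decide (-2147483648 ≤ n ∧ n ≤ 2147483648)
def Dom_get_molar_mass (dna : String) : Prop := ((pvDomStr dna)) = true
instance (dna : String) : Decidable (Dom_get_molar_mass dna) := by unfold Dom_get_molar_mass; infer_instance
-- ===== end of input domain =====

-- B replaces A's per-character if/elif accumulation loop by a frequency dict built once
-- followed by a weighted sum over the four base→mass pairs (alternative decomposition, same cost).

-- ===== PORT A =====
-- shared helper (textually identical in A and B)
def is_dna (dna : String) : Bool :=
  if dna.toList.isEmpty then false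
  else (PySem.Str.upper dna).toList.all (fun c => PySem.Str.isIn (String.ofList [c]) "ATGC")

def get_molar_mass (dna : String) : Int :=
  if is_dna dna = true then
    dna.toList.foldl (fun compt base =>
      if base = 'A' then compt + 135
      else if base = 'T' then compt + 126
      else if base = 'G' then compt + 151
      else if base = 'C' then compt + 111
      else compt) 0
  else 0

-- ===== PORT B =====
def get_molar_mass_alt (dna : String) : Int :=
  if is_dna dna = true then
    let counts : PySem.Dict Char Int :=
      dna.toList.foldl (fun d ch => d.insert ch (d.getD ch 0 + 1)) PySem.Dict.empty
    [('A', (135 : Int)), ('T', 126), ('G', 151), ('C', 111)].foldl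
      (fun acc p => acc + p.2 * counts.getD p.1 0) 0
  else 0

-- ===== PRECONDITION & SPEC =====
def Spec_get_molar_mass (dna : String) (out : Int) : Prop := out = get_molar_mass_alt dna
instance (dna : String) (out : Int) : Decidable (Spec_get_molar_mass dna out) := by unfold Spec_get_molar_mass; infer_instance

-- ===== CLAIM (what is proved, stated in full; the proofs are below) =====
def Claim_equal_get_molar_mass : Prop := ∀ (dna : String), Dom_get_molar_mass dna → Spec_get_molar_mass dna (get_molar_mass dna)

-- ===== LEMMAS AND PROOFS =====
-- A's loop counted by character classes: closed form of the accumulation.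
theorem loopA_eq (l : List Char) (c : Int) :
    l.foldl (fun compt base =>
      if base = 'A' then compt + 135
      else if base = 'T' then compt + 126
      else if base = 'G' then compt + 151
      else if base = 'C' then compt + 111
      else compt) c
    = c + 135 * (l.count 'A' : Int) + 126 * (l.count 'T' : Int)
        + 151 * (l.count 'G' : Int) + 111 * (l.count 'C' : Int) := by
  induction l generalizing c with
  | nil => simp
  | cons h t ih =>
    simp only [List.foldl_cons, List.count_cons, ih]
    split_ifs <;> subst_vars <;> try (push_cast; ring)
    all_goals simp_all

-- ===== VERDICT (by name: the statement is the Claim_ definition above) =====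
theorem get_molar_mass_spec : Claim_equal_get_molar_mass := by
  intro dna _
  unfold Spec_get_molar_mass get_molar_mass get_molar_mass_alt
  by_cases h : is_dna dna = true
  · simp only [h, if_true, loopA_eq, List.foldl_cons, List.foldl_nil,
      PySem.Dict.getD_foldl_insert_add_one, PySem.Dict.getD_empty]
    ring
  · simp [h]
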